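-- pv_equiv track=rewrite | github.com/plhosk/wordtracer | scripts/generate_boards.py | derive_walls_sparse
-- ===== SOURCE A (Python) =====
-- def derive_walls_sparse(
--     rows: int,
--     cols: int,
--     paths: dict[str, list[list[int]]],
--     h: list[list[int]],
--     v: list[list[int]],
-- ) -> dict[str, list[int]]:
--     """
--     Build sparse cell-based walls representation.
--     Returns dict mapping "row,col" -> [top, right, bottom, left]
--     Walls are 1 if present, 0 if absent.
--     - Boundary walls (edges of occupied area) are always 1
--     - Internal walls between adjacent occupied cells use puzzle wall value
--     """
--     # Get all occupied cells
--     occupied: set[tuple[int, int]] = set()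
--     for path in paths.values():
--         for cell in path:
--             occupied.add((cell[0], cell[1]))
--
--     walls: dict[str, list[int]] = {}
--     for r, c in occupied:
--         # Top wall: boundary if no occupied cell above, else puzzle wall value
--         if (r - 1, c) not in occupied:
--             top = 1
--         elif r > 0:
--             top = h[r - 1][c]
--         else:
--             top = 1
--
--         # Bottom wall: boundary if no occupied cell below, else puzzle wall value
--         if (r + 1, c) not in occupied:
--             bottom = 1
--         elif r < rows - 1:
--             bottom = h[r][c]
--         else:
--             bottom = 1
--
--         # Left wall: boundary if no occupied cell to left, else puzzle wall value
--         if (r, c - 1) not in occupied: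
--             left = 1
--         elif c > 0:
--             left = v[r][c - 1]
--         else:
--             left = 1
--
--         # Right wall: boundary if no occupied cell to right, else puzzle wall value
--         if (r, c + 1) not in occupied:
--             right = 1
--         elif c < cols - 1:
--             right = v[r][c]
--         else:
--             right = 1
--
--         walls[f"{r},{c}"] = [top, right, bottom, left]
--
--     return walls
-- ===== SOURCE B (Python) =====
-- def derive_walls_sparse(rows, cols, paths, h, v):
--     # Row-run algorithm: group occupied cells by row, find vertical walls by
--     # scanning consecutive columns of each sorted row run, and horizontal
--     # walls by intersecting each row's columns with the next row's.
--     occupied = {(cell[0], cell[1]) for path in paths.values() for cell in path}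
--
--     cols_by_row = {}
--     for r, c in occupied:
--         cols_by_row.setdefault(r, set()).add(c)
--
--     quads = {p: [1, 1, 1, 1] for p in occupied}
--     for r, cs in cols_by_row.items():
--         run = sorted(cs)
--         for a, b in zip(run, run[1:]):
--             if b == a + 1:  # vertical edge between horizontally adjacent cells
--                 quads[(r, a)][1] = v[r][a]
--                 quads[(r, b)][3] = v[r][a]
--         for c in cs & cols_by_row.get(r + 1, set()):  # edges to the row below
--             quads[(r, c)][2] = h[r][c]
--             quads[(r + 1, c)][0] = h[r][c]
--
--     return {f"{r},{c}": quads[(r, c)] for (r, c) in occupied}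
-- ===== Notes on version B (the rewrite author's own statement) =====
-- stated objective: alternative
-- what changed: B replaces A's four-set-membership-tests-per-cell loop with a row-run algorithm: it groups occupied cells by row, finds vertical walls by scanning consecutive columns in each row's sorted run, and horizontal walls by intersecting each row's column set with the next row's, writing both sides of each internal edge once; Pre_ requires every edge between adjacent occupied cells to lie inside the board's wall grid (the function's natural domain), since out-of-range edges reach A's h/v lookups only through negative-index wraparound and one-sided bound guards.
import Mathlib
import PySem

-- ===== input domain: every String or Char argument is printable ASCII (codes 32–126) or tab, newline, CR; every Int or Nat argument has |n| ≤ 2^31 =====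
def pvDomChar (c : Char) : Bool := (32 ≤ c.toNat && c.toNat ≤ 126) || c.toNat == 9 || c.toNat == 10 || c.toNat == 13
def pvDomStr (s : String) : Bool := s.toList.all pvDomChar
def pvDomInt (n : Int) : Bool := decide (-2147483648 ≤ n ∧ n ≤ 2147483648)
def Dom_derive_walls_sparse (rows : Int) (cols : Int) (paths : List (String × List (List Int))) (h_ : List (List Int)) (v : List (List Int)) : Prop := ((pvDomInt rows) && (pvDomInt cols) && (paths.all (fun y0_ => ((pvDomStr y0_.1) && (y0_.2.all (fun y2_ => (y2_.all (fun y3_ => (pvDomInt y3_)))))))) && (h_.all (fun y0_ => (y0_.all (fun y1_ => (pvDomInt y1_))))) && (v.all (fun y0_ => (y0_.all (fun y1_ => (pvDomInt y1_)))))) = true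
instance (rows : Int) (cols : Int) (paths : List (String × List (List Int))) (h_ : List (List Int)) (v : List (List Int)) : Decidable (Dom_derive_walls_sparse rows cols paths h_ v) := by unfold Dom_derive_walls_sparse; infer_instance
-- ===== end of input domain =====

-- B replaces A's four-membership-tests-per-cell loop by a row-run algorithm: it groups the
-- occupied cells by row, finds vertical walls by scanning consecutive columns of each row's
-- sorted run, and horizontal walls by intersecting each row's column set with the next row's.

-- ===== PORT A =====
-- h[a][b] / v[a][b]; total via defaults, in range on every access A makes inside Pre_
def pvHVGet (g : List (List Int)) (a b : Int) : Int :=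
  PySem.List.pyGetD (PySem.List.pyGetD g a []) b 0

-- f"{r},{c}"
def pvKey (p : Int × Int) : String := PySem.Int.toStr p.1 ++ "," ++ PySem.Int.toStr p.2

-- occupied = set of (cell[0], cell[1]); identical first phase of both Pythons
def pvOcc (paths : List (String × List (List Int))) : PySem.Set (Int × Int) :=
  (PySem.Dict.mk paths).values.foldl
    (fun s path => path.foldl
      (fun s cell => PySem.Set.add s (PySem.List.pyGetD cell 0 0, PySem.List.pyGetD cell 1 0)) s)
    PySem.Set.empty

-- the body of A's loop: top/right/bottom/left for one occupied cell
def pvQuad (rows cols : Int) (h_ v : List (List Int)) (occ : PySem.Set (Int × Int)) (p : Int × Int) : List Int :=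
  let r := p.1
  let c := p.2
  let top := if !(PySem.Set.contains occ (r - 1, c)) then 1 else if r > 0 then pvHVGet h_ (r - 1) c else 1
  let bottom := if !(PySem.Set.contains occ (r + 1, c)) then 1 else if r < rows - 1 then pvHVGet h_ r c else 1
  let left := if !(PySem.Set.contains occ (r, c - 1)) then 1 else if c > 0 then pvHVGet v r (c - 1) else 1
  let right := if !(PySem.Set.contains occ (r, c + 1)) then 1 else if c < cols - 1 then pvHVGet v r c else 1
  [top, right, bottom, left]

def derive_walls_sparse (rows : Int) (cols : Int) (paths : List (String × List (List Int))) (h_ : List (List Int)) (v : List (List Int)) : List (String × List Int) :=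
  let occ := pvOcc paths
  (occ.foldl (fun w p => w.insert (pvKey p) (pvQuad rows cols h_ v occ p)) PySem.Dict.empty).items

-- ===== PORT B =====
def pvW0 : List Int := [1, 1, 1, 1]

-- cols_by_row: r -> set of occupied columns in row r (setdefault(r, set()).add(c))
def pvCbr (occ : PySem.Set (Int × Int)) : PySem.Dict Int (PySem.Set Int) :=
  occ.foldl (fun d p => d.modify p.1 PySem.Set.empty (fun s => PySem.Set.add s p.2)) PySem.Dict.empty

-- one iteration over zip(run, run[1:]): a vertical edge between horizontally adjacent cells
def pvVStep (v : List (List Int)) (r : Int) (q : PySem.Dict (Int × Int) (List Int)) (ab : Int × Int) : PySem.Dict (Int × Int) (List Int) :=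
  if ab.2 == ab.1 + 1 then
    ((q.modify (r, ab.1) pvW0 (fun w => PySem.List.pySetD w 1 (pvHVGet v r ab.1))).modify
      (r, ab.2) pvW0 (fun w => PySem.List.pySetD w 3 (pvHVGet v r ab.1)))
  else q

-- one iteration over cs & cols_by_row.get(r+1, set()): an edge to the row below
def pvHStep (h_ : List (List Int)) (r : Int) (q : PySem.Dict (Int × Int) (List Int)) (c : Int) : PySem.Dict (Int × Int) (List Int) :=
  ((q.modify (r, c) pvW0 (fun w => PySem.List.pySetD w 2 (pvHVGet h_ r c))).modify
    (r + 1, c) pvW0 (fun w => PySem.List.pySetD w 0 (pvHVGet h_ r c)))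

-- the body of B's loop over cols_by_row.items()
def pvRowStep (h_ v : List (List Int)) (cbr : PySem.Dict Int (PySem.Set Int)) (q : PySem.Dict (Int × Int) (List Int)) (e : Int × PySem.Set Int) : PySem.Dict (Int × Int) (List Int) :=
  let run := PySem.List.sorted e.2 (fun x => x) false
  let q1 := (run.zip run.tail).foldl (pvVStep v e.1) q
  (PySem.Set.inter e.2 (cbr.getD (e.1 + 1) PySem.Set.empty)).foldl (pvHStep h_ e.1) q1

def derive_walls_sparse_alt (rows : Int) (cols : Int) (paths : List (String × List (List Int))) (h_ : List (List Int)) (v : List (List Int)) : List (String × List Int) :=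
  let occ := pvOcc paths
  let cbr := pvCbr occ
  let quads0 := occ.foldl (fun d p => d.insert p pvW0) PySem.Dict.empty
  let quads := cbr.items.foldl (pvRowStep h_ v cbr) quads0
  (occ.foldl (fun d p => d.insert (pvKey p) (quads.getD p pvW0)) PySem.Dict.empty).items

-- ===== PRECONDITION & SPEC =====
-- the (cell[0], cell[1]) pairs of all path cells, as plain input inspection
def pvCells (paths : List (String × List (List Int))) : List (Int × Int) :=
  paths.flatMap (fun pr => pr.2.map (fun cell => (PySem.List.pyGetD cell 0 0, PySem.List.pyGetD cell 1 0)))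

-- g[a][b] as an Option (none = IndexError)
def pvAt (g : List (List Int)) (a b : Int) : Option Int :=
  (PySem.List.pyGet? g a).bind (fun row => PySem.List.pyGet? row b)

-- Pre_ keeps the claim to the function's natural domain: wherever two occupied cells are
-- adjacent, their shared edge must lie inside the board's wall grid (0 ≤ c < cols-1 for a
-- vertical edge, 0 ≤ r < rows-1 for a horizontal one) and the h/v entry it reads must exist
-- (A raises IndexError otherwise); edges outside that range reach A's h/v lookups only
-- through negative-index wraparound and one-sided bound guards. A path cell with fewer than
-- two entries (on which A raises IndexError) is excluded too.
def Pre_derive_walls_sparse (rows : Int) (cols : Int) (paths : List (String × List (List Int))) (h_ : List (List Int)) (v : List (List Int)) : Prop :=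
  (∀ pr ∈ paths, ∀ cell ∈ pr.2, 2 ≤ cell.length) ∧
  (∀ p ∈ pvCells paths,
    ((p.1, p.2 + 1) ∈ pvCells paths → 0 ≤ p.2 ∧ p.2 < cols - 1 ∧ (pvAt v p.1 p.2).isSome) ∧
    ((p.1 + 1, p.2) ∈ pvCells paths → 0 ≤ p.1 ∧ p.1 < rows - 1 ∧ (pvAt h_ p.1 p.2).isSome))

instance (rows : Int) (cols : Int) (paths : List (String × List (List Int))) (h_ : List (List Int)) (v : List (List Int)) : Decidable (Pre_derive_walls_sparse rows cols paths h_ v) := by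
  unfold Pre_derive_walls_sparse; infer_instance

def pvWitness_derive_walls_sparse : Int × Int × (List (String × List (List Int))) × List (List Int) × List (List Int) :=
  (2, 2, [("a", [[0, 0], [0, 1]])], [[1, 1]], [[0], [0]])

def Spec_derive_walls_sparse (rows : Int) (cols : Int) (paths : List (String × List (List Int))) (h_ : List (List Int)) (v : List (List Int)) (out : List (String × List Int)) : Prop := out = derive_walls_sparse_alt rows cols paths h_ v
instance (rows : Int) (cols : Int) (paths : List (String × List (List Int))) (h_ : List (List Int)) (v : List (List Int)) (out : List (String × List Int)) : Decidable (Spec_derive_walls_sparse rows cols paths h_ v out) := by unfold Spec_derive_walls_sparse; infer_instance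

-- ===== CLAIM (what is proved, stated in full; the proofs are below) =====
def Claim_equal_derive_walls_sparse : Prop := ∀ (rows : Int) (cols : Int) (paths : List (String × List (List Int))) (h_ : List (List Int)) (v : List (List Int)), Dom_derive_walls_sparse rows cols paths h_ v → Pre_derive_walls_sparse rows cols paths h_ v → Spec_derive_walls_sparse rows cols paths h_ v (derive_walls_sparse rows cols paths h_ v)

-- ===== LEMMAS AND PROOFS =====

-- pvOcc is set(pvCells)
theorem pvOcc_eq (paths : List (String × List (List Int))) :
    pvOcc paths = PySem.Set.ofList (pvCells paths) := by
  have key : ∀ (L : List (List (List Int))) (s : PySem.Set (Int × Int)),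
      L.foldl (fun s path => path.foldl
        (fun s cell => PySem.Set.add s (PySem.List.pyGetD cell 0 0, PySem.List.pyGetD cell 1 0)) s) s
      = (L.flatMap (fun path => path.map
          (fun cell => (PySem.List.pyGetD cell 0 0, PySem.List.pyGetD cell 1 0)))).foldl PySem.Set.add s := by
    intro L
    induction L with
    | nil => intro s; rfl
    | cons a L ih =>
      intro s
      simp only [List.foldl_cons, List.flatMap_cons, List.foldl_append, ih, List.foldl_map]
  show (paths.map (·.2)).foldl _ PySem.Set.empty = _
  rw [key, PySem.Set.ofList_eq_foldl]
  have hl : (paths.map (·.2)).flatMap (fun path => path.map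
      (fun cell => (PySem.List.pyGetD cell 0 0, PySem.List.pyGetD cell 1 0))) = pvCells paths := by
    simp [pvCells, List.flatMap_map, Function.comp]
  rw [hl]
  rfl

-- membership in a row set of cols_by_row
theorem mem_getD_cbr_fold (l : List (Int × Int)) :
    ∀ (d : PySem.Dict Int (PySem.Set Int)) (r c : Int),
      (c ∈ (l.foldl (fun d p => d.modify p.1 PySem.Set.empty (fun s => PySem.Set.add s p.2)) d).getD r PySem.Set.empty
        ↔ c ∈ d.getD r PySem.Set.empty ∨ (r, c) ∈ l) := by
  induction l with
  | nil => intro d r c; simp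
  | cons p l ih =>
    intro d r c
    simp only [List.foldl_cons]
    rw [ih]
    rw [PySem.Dict.getD_modify]
    by_cases hr : r = p.1
    · subst hr
      rw [if_pos rfl, PySem.Set.mem_add]
      constructor
      · rintro (⟨hm | hc⟩ | hl)
        · exact Or.inl hm
        · exact Or.inr (List.mem_cons.mpr (Or.inl (by
            obtain ⟨a, b⟩ := p; simp_all)))
        · exact Or.inr (List.mem_cons.mpr (Or.inr hl))
      · rintro (hm | hl)
        · exact Or.inl (Or.inl hm)
        · rcases List.mem_cons.mp hl with he | hl
          · exact Or.inl (Or.inr (by obtain ⟨a, b⟩ := p; simp_all))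
          · exact Or.inr hl
    · rw [if_neg hr]
      constructor
      · rintro (hm | hl)
        · exact Or.inl hm
        · exact Or.inr (List.mem_cons.mpr (Or.inr hl))
      · rintro (hm | hl)
        · exact Or.inl hm
        · rcases List.mem_cons.mp hl with he | hl
          · exact absurd (congrArg Prod.fst he) hr
          · exact Or.inr hl

theorem nodup_getD_cbr_fold (l : List (Int × Int)) :
    ∀ (d : PySem.Dict Int (PySem.Set Int)),
      (∀ r', ((d.getD r' PySem.Set.empty : PySem.Set Int)).Nodup) →
      ∀ r, ((l.foldl (fun d p => d.modify p.1 PySem.Set.empty (fun s => PySem.Set.add s p.2)) d).getD r PySem.Set.empty : PySem.Set Int).Nodup := by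
  induction l with
  | nil => intro d hd r; exact hd r
  | cons p l ih =>
    intro d hd r
    simp only [List.foldl_cons]
    refine ih _ (fun r' => ?_) r
    rw [PySem.Dict.getD_modify]
    by_cases hr : r' = p.1
    · rw [if_pos hr]; exact PySem.Set.nodup_add _ _ (hd p.1)
    · rw [if_neg hr]; exact hd r'

-- single occupied cell in a row set
theorem mem_getD_pvCbr (occ : PySem.Set (Int × Int)) (r c : Int) :
    c ∈ (pvCbr occ).getD r PySem.Set.empty ↔ (r, c) ∈ occ := by
  unfold pvCbr
  rw [mem_getD_cbr_fold]
  simp [PySem.Dict.getD_empty, PySem.Set.empty]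

theorem nodup_getD_pvCbr (occ : PySem.Set (Int × Int)) (r : Int) :
    ((pvCbr occ).getD r PySem.Set.empty : PySem.Set Int).Nodup := by
  unfold pvCbr
  exact nodup_getD_cbr_fold occ PySem.Dict.empty
    (fun r' => by simp [PySem.Dict.getD_empty, PySem.Set.empty]) r

theorem keys_pvCbr (occ : PySem.Set (Int × Int)) :
    (pvCbr occ).keys = PySem.Set.ofList (occ.map (·.1)) := by
  unfold pvCbr
  have := PySem.Dict.keys_foldl_modify_key occ (fun p => p.1) PySem.Set.empty
    (fun _ p => (fun s => PySem.Set.add s p.2)) PySem.Dict.empty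
  rw [this]
  simp [PySem.Dict.keys_empty, PySem.Set.update_nil_left]

theorem nodup_keys_pvCbr (occ : PySem.Set (Int × Int)) : (pvCbr occ).keys.Nodup := by
  rw [keys_pvCbr]; exact PySem.Set.nodup_ofList _

-- sorted run of a Nodup set is strictly increasing
theorem run_pairwise_lt (cs : PySem.Set Int) (hnd : cs.Nodup) :
    (PySem.List.sorted cs (fun x => x) false).Pairwise (· < ·) := by
  have hle := PySem.List.sorted_pairwise cs (fun x => x)
  have hnd' : (PySem.List.sorted cs (fun x => x) false).Nodup :=
    ((PySem.List.sorted_perm cs (fun x => x) false).nodup_iff).mpr hnd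
  exact (hle.and hnd').imp (fun h => lt_of_le_of_ne h.1 h.2)

-- in a strictly increasing list, (x, x+1) is an adjacent pair iff both are members
theorem pvAdjPair (l : List Int) (hs : l.Pairwise (· < ·)) (x : Int) :
    (x, x + 1) ∈ l.zip l.tail ↔ x ∈ l ∧ x + 1 ∈ l := by
  induction l with
  | nil => simp
  | cons a t ih =>
    have ha : ∀ y ∈ t, a < y := (List.pairwise_cons.mp hs).1
    have ht : t.Pairwise (· < ·) := (List.pairwise_cons.mp hs).2
    have iht := ih ht
    cases t with
    | nil =>
      simp only [List.tail_cons, List.zip_nil_right, List.not_mem_nil, false_iff]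
      rintro ⟨hx, hx1⟩
      simp only [List.mem_singleton] at hx hx1
      omega
    | cons b t' =>
      have hb : ∀ y ∈ t', b < y := (List.pairwise_cons.mp ht).1
      have hab : a < b := ha b List.mem_cons_self
      simp only [List.tail_cons] at iht ⊢
      show (x, x + 1) ∈ (a, b) :: ((b :: t').zip t') ↔ _
      have hzt : (b :: t').zip t' = (b :: t').zip (b :: t').tail := rfl
      constructor
      · intro hm
        rcases List.mem_cons.mp hm with he | hm
        · have h1 : x = a := (Prod.mk.injEq _ _ _ _ ▸ he).1
          have h2 : x + 1 = b := (Prod.mk.injEq _ _ _ _ ▸ he).2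
          exact ⟨by simp [h1], by simp [h2]⟩
        · rw [hzt] at hm
          have := iht.mp hm
          exact ⟨List.mem_cons_of_mem _ this.1, List.mem_cons_of_mem _ this.2⟩
      · rintro ⟨hx, hx1⟩
        rcases List.mem_cons.mp hx with hxa | hxt
        · subst hxa
          rcases List.mem_cons.mp hx1 with hxb | hxt1
          · omega
          · -- x + 1 ∈ b :: t'
            rcases List.mem_cons.mp hxt1 with hxb | hxt'
            · exact List.mem_cons.mpr (Or.inl (by rw [hxb]))
            · have := hb _ hxt'
              omega
        · have hx1t : x + 1 ∈ b :: t' := by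
            rcases List.mem_cons.mp hx1 with hxb | h
            · exfalso; have := ha _ hxt; omega
            · exact h
          exact List.mem_cons.mpr (Or.inr (hzt ▸ iht.mpr ⟨hxt, hx1t⟩))

-- getD through one vertical-edge step
theorem getD_pvVStep (v : List (List Int)) (r : Int) (q : PySem.Dict (Int × Int) (List Int)) (ab x : Int × Int) :
    (pvVStep v r q ab).getD x pvW0 =
      if ab.2 = ab.1 + 1 then
        (if x = (r, ab.2) then PySem.List.pySetD (q.getD x pvW0) 3 (pvHVGet v r ab.1)
         else if x = (r, ab.1) then PySem.List.pySetD (q.getD x pvW0) 1 (pvHVGet v r ab.1)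
         else q.getD x pvW0)
      else q.getD x pvW0 := by
  by_cases hg : ab.2 = ab.1 + 1
  · have hgb : (ab.2 == ab.1 + 1) = true := by simp [hg]
    have hne : ((r, ab.1) : Int × Int) ≠ (r, ab.2) := by
      intro hh; have := congrArg Prod.snd hh; simp at this; omega
    have hun : pvVStep v r q ab =
        ((q.modify (r, ab.1) pvW0 (fun w => PySem.List.pySetD w 1 (pvHVGet v r ab.1))).modify
          (r, ab.2) pvW0 (fun w => PySem.List.pySetD w 3 (pvHVGet v r ab.1))) := by
      unfold pvVStep; rw [hgb]; simp
    rw [hun, if_pos hg, PySem.Dict.getD_modify]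
    by_cases e1 : x = (r, ab.2)
    · rw [if_pos e1, if_pos e1, PySem.Dict.getD_modify, if_neg (Ne.symm hne), e1]
    · rw [if_neg e1, if_neg e1, PySem.Dict.getD_modify]
      by_cases e2 : x = (r, ab.1)
      · rw [if_pos e2, if_pos e2, e2]
      · rw [if_neg e2, if_neg e2]
  · have hgb : (ab.2 == ab.1 + 1) = false := by simp [hg]
    have hun : pvVStep v r q ab = q := by unfold pvVStep; rw [hgb]; simp
    rw [hun, if_neg hg]

-- getD through one horizontal-edge step
theorem getD_pvHStep (h_ : List (List Int)) (r : Int) (q : PySem.Dict (Int × Int) (List Int)) (c : Int) (x : Int × Int) :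
    (pvHStep h_ r q c).getD x pvW0 =
      if x = (r + 1, c) then PySem.List.pySetD (q.getD x pvW0) 0 (pvHVGet h_ r c)
      else if x = (r, c) then PySem.List.pySetD (q.getD x pvW0) 2 (pvHVGet h_ r c)
      else q.getD x pvW0 := by
  have hne : ((r, c) : Int × Int) ≠ (r + 1, c) := by
    intro hh; rw [Prod.mk.injEq] at hh; omega
  have hun : pvHStep h_ r q c =
      ((q.modify (r, c) pvW0 (fun w => PySem.List.pySetD w 2 (pvHVGet h_ r c))).modify
        (r + 1, c) pvW0 (fun w => PySem.List.pySetD w 0 (pvHVGet h_ r c))) := rfl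
  rw [hun, PySem.Dict.getD_modify]
  by_cases e1 : x = (r + 1, c)
  · rw [if_pos e1, if_pos e1, PySem.Dict.getD_modify, if_neg (Ne.symm hne), e1]
  · rw [if_neg e1, if_neg e1, PySem.Dict.getD_modify]
    by_cases e2 : x = (r, c)
    · rw [if_pos e2, if_pos e2, e2]
    · rw [if_neg e2, if_neg e2]

-- lengths are preserved
theorem len_getD_pvVStep (v : List (List Int)) (r : Int) (q : PySem.Dict (Int × Int) (List Int)) (ab x : Int × Int) :
    ((pvVStep v r q ab).getD x pvW0).length = (q.getD x pvW0).length := by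
  rw [getD_pvVStep]; split_ifs <;> simp [PySem.List.length_pySetD]

theorem len_getD_pvHStep (h_ : List (List Int)) (r : Int) (q : PySem.Dict (Int × Int) (List Int)) (c : Int) (x : Int × Int) :
    ((pvHStep h_ r q c).getD x pvW0).length = (q.getD x pvW0).length := by
  rw [getD_pvHStep]; split_ifs <;> simp [PySem.List.length_pySetD]

theorem len_getD_vfold (v : List (List Int)) (r : Int) (P : List (Int × Int)) :
    ∀ (q : PySem.Dict (Int × Int) (List Int)) (x : Int × Int),
      ((P.foldl (pvVStep v r) q).getD x pvW0).length = (q.getD x pvW0).length := by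
  induction P with
  | nil => intro q x; rfl
  | cons ab P ih => intro q x; simp only [List.foldl_cons]; rw [ih, len_getD_pvVStep]

theorem len_getD_hfold (h_ : List (List Int)) (r : Int) (L : List Int) :
    ∀ (q : PySem.Dict (Int × Int) (List Int)) (x : Int × Int),
      ((L.foldl (pvHStep h_ r) q).getD x pvW0).length = (q.getD x pvW0).length := by
  induction L with
  | nil => intro q x; rfl
  | cons c L ih => intro q x; simp only [List.foldl_cons]; rw [ih, len_getD_pvHStep]

theorem len_getD_pvRowStep (h_ v : List (List Int)) (cbr : PySem.Dict Int (PySem.Set Int))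
    (q : PySem.Dict (Int × Int) (List Int)) (e : Int × PySem.Set Int) (x : Int × Int) :
    ((pvRowStep h_ v cbr q e).getD x pvW0).length = (q.getD x pvW0).length := by
  simp only [pvRowStep]
  rw [len_getD_hfold, len_getD_vfold]

theorem len_getD_outer (h_ v : List (List Int)) (cbr : PySem.Dict Int (PySem.Set Int))
    (E : List (Int × PySem.Set Int)) :
    ∀ (q : PySem.Dict (Int × Int) (List Int)) (x : Int × Int),
      ((E.foldl (pvRowStep h_ v cbr) q).getD x pvW0).length = (q.getD x pvW0).length := by
  induction E with
  | nil => intro q x; rfl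
  | cons e E ih => intro q x; simp only [List.foldl_cons]; rw [ih, len_getD_pvRowStep]

theorem pvSetD_set (w : List Int) (i : Nat) (x : Int) :
    PySem.List.pySetD w (i : Int) x = w.set i x := by
  rw [PySem.List.pySetD_of_nonneg _ _ (by positivity)]; simp

-- component 1 through the vertical fold
theorem vfold_comp1 (v : List (List Int)) (r : Int) (P : List (Int × Int)) :
    ∀ (q : PySem.Dict (Int × Int) (List Int)) (x : Int × Int), (q.getD x pvW0).length = 4 →
      ((P.foldl (pvVStep v r) q).getD x pvW0)[1]? =
        if x.1 = r ∧ (x.2, x.2 + 1) ∈ P then some (pvHVGet v r x.2) else ((q.getD x pvW0))[1]? := by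
  induction P with
  | nil => intro q x _; simp
  | cons ab P ih =>
    rintro q ⟨x1, x2⟩ hlen
    obtain ⟨a1, a2⟩ := ab
    simp only [List.foldl_cons]
    rw [ih _ _ (by rw [len_getD_pvVStep]; exact hlen), getD_pvVStep]
    simp only [Prod.mk.injEq, List.mem_cons]
    by_cases hP : x1 = r ∧ ((x2 : Int), x2 + 1) ∈ P
    · rw [if_pos hP,
        if_pos (show x1 = r ∧ ((x2 = a1 ∧ x2 + 1 = a2) ∨ ((x2 : Int), x2 + 1) ∈ P) from
          ⟨hP.1, Or.inr hP.2⟩)]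
    · rw [if_neg hP]
      by_cases hH : x1 = r ∧ x2 = a1 ∧ x2 + 1 = a2
      · obtain ⟨hr1, ha1, ha2⟩ := hH
        subst ha1
        subst ha2
        rw [if_pos (show x2 + 1 = x2 + 1 from rfl)]
        rw [if_neg (show ¬(x1 = r ∧ x2 = x2 + 1) from by rintro ⟨_, hx⟩; omega)]
        rw [if_pos (show x1 = r ∧ x2 = x2 from ⟨hr1, rfl⟩)]
        rw [if_pos (show x1 = r ∧ ((x2 = x2 ∧ x2 + 1 = x2 + 1) ∨ ((x2 : Int), x2 + 1) ∈ P) from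
          ⟨hr1, Or.inl ⟨rfl, rfl⟩⟩)]
        rw [show (1 : Int) = ((1 : Nat) : Int) from rfl, pvSetD_set,
          List.getElem?_set_self (by omega)]
      · rw [if_neg (show ¬(x1 = r ∧ ((x2 = a1 ∧ x2 + 1 = a2) ∨ ((x2 : Int), x2 + 1) ∈ P)) from by
          rintro ⟨hr1, hor⟩
          rcases hor with ⟨hu1, hu2⟩ | hm
          · exact hH ⟨hr1, hu1, hu2⟩
          · exact hP ⟨hr1, hm⟩)]
        split_ifs with hg e1 e2
        · rw [show (3 : Int) = ((3 : Nat) : Int) from rfl, pvSetD_set,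
            List.getElem?_set_ne (by omega)]
        · exact absurd ⟨e2.1, e2.2, by omega⟩ hH
        · rfl
        · rfl

-- component 3 through the vertical fold
theorem vfold_comp3 (v : List (List Int)) (r : Int) (P : List (Int × Int)) :
    ∀ (q : PySem.Dict (Int × Int) (List Int)) (x : Int × Int), (q.getD x pvW0).length = 4 →
      ((P.foldl (pvVStep v r) q).getD x pvW0)[3]? =
        if x.1 = r ∧ (x.2 - 1, x.2) ∈ P then some (pvHVGet v r (x.2 - 1)) else ((q.getD x pvW0))[3]? := by
  induction P with
  | nil => intro q x _; simp
  | cons ab P ih =>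
    rintro q ⟨x1, x2⟩ hlen
    obtain ⟨a1, a2⟩ := ab
    simp only [List.foldl_cons]
    rw [ih _ _ (by rw [len_getD_pvVStep]; exact hlen), getD_pvVStep]
    simp only [Prod.mk.injEq, List.mem_cons]
    by_cases hP : x1 = r ∧ ((x2 : Int) - 1, x2) ∈ P
    · rw [if_pos hP,
        if_pos (show x1 = r ∧ ((x2 - 1 = a1 ∧ x2 = a2) ∨ ((x2 : Int) - 1, x2) ∈ P) from
          ⟨hP.1, Or.inr hP.2⟩)]
    · rw [if_neg hP]
      by_cases hH : x1 = r ∧ x2 - 1 = a1 ∧ x2 = a2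
      · obtain ⟨hr1, ha1, ha2⟩ := hH
        subst ha1
        subst ha2
        rw [if_pos (show x2 = x2 - 1 + 1 from by omega)]
        rw [if_pos (show x1 = r ∧ x2 = x2 from ⟨hr1, rfl⟩)]
        rw [if_pos (show x1 = r ∧ ((x2 - 1 = x2 - 1 ∧ x2 = x2) ∨ ((x2 : Int) - 1, x2) ∈ P) from
          ⟨hr1, Or.inl ⟨rfl, rfl⟩⟩)]
        rw [show (3 : Int) = ((3 : Nat) : Int) from rfl, pvSetD_set,
          List.getElem?_set_self (by omega)]
      · rw [if_neg (show ¬(x1 = r ∧ ((x2 - 1 = a1 ∧ x2 = a2) ∨ ((x2 : Int) - 1, x2) ∈ P)) from by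
          rintro ⟨hr1, hor⟩
          rcases hor with ⟨hu1, hu2⟩ | hm
          · exact hH ⟨hr1, hu1, hu2⟩
          · exact hP ⟨hr1, hm⟩)]
        split_ifs with hg e1 e2
        · exact absurd ⟨e1.1, by omega, e1.2⟩ hH
        · rw [show (1 : Int) = ((1 : Nat) : Int) from rfl, pvSetD_set,
            List.getElem?_set_ne (by omega)]
        · rfl
        · rfl

-- components 0 and 2 are untouched by the vertical fold
theorem vfold_comp02 (v : List (List Int)) (r : Int) (P : List (Int × Int)) (k : Nat)
    (hk1 : k ≠ 1) (hk3 : k ≠ 3) :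
    ∀ (q : PySem.Dict (Int × Int) (List Int)) (x : Int × Int),
      ((P.foldl (pvVStep v r) q).getD x pvW0)[k]? = ((q.getD x pvW0))[k]? := by
  induction P with
  | nil => intro q x; rfl
  | cons ab P ih =>
    intro q x
    simp only [List.foldl_cons]
    rw [ih, getD_pvVStep]
    split_ifs
    · rw [show (3 : Int) = ((3 : Nat) : Int) from rfl, pvSetD_set, List.getElem?_set_ne (by omega)]
    · rw [show (1 : Int) = ((1 : Nat) : Int) from rfl, pvSetD_set, List.getElem?_set_ne (by omega)]
    · rfl
    · rfl

-- component 2 through the horizontal fold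
theorem hfold_comp2 (h_ : List (List Int)) (r : Int) (L : List Int) :
    ∀ (q : PySem.Dict (Int × Int) (List Int)) (x : Int × Int), (q.getD x pvW0).length = 4 →
      ((L.foldl (pvHStep h_ r) q).getD x pvW0)[2]? =
        if x.1 = r ∧ x.2 ∈ L then some (pvHVGet h_ r x.2) else ((q.getD x pvW0))[2]? := by
  induction L with
  | nil => intro q x _; simp
  | cons c L ih =>
    rintro q ⟨x1, x2⟩ hlen
    simp only [List.foldl_cons]
    rw [ih _ _ (by rw [len_getD_pvHStep]; exact hlen), getD_pvHStep]
    simp only [Prod.mk.injEq, List.mem_cons]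
    by_cases hP : x1 = r ∧ (x2 : Int) ∈ L
    · rw [if_pos hP, if_pos (show x1 = r ∧ (x2 = c ∨ (x2 : Int) ∈ L) from ⟨hP.1, Or.inr hP.2⟩)]
    · rw [if_neg hP]
      by_cases hH : x1 = r ∧ x2 = c
      · obtain ⟨hr1, hc1⟩ := hH
        subst hc1
        rw [if_neg (show ¬(x1 = r + 1 ∧ x2 = x2) from by rintro ⟨hx, _⟩; omega)]
        rw [if_pos (show x1 = r ∧ x2 = x2 from ⟨hr1, rfl⟩)]
        rw [if_pos (show x1 = r ∧ (x2 = x2 ∨ (x2 : Int) ∈ L) from ⟨hr1, Or.inl rfl⟩)]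
        rw [show (2 : Int) = ((2 : Nat) : Int) from rfl, pvSetD_set,
          List.getElem?_set_self (by omega)]
      · rw [if_neg (show ¬(x1 = r ∧ (x2 = c ∨ (x2 : Int) ∈ L)) from by
          rintro ⟨hr1, hor⟩
          rcases hor with hu | hm
          · exact hH ⟨hr1, hu⟩
          · exact hP ⟨hr1, hm⟩)]
        split_ifs with e1
        · rw [show (0 : Int) = ((0 : Nat) : Int) from rfl, pvSetD_set,
            List.getElem?_set_ne (by omega)]
        · rfl

-- component 0 through the horizontal fold
theorem hfold_comp0 (h_ : List (List Int)) (r : Int) (L : List Int) :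
    ∀ (q : PySem.Dict (Int × Int) (List Int)) (x : Int × Int), (q.getD x pvW0).length = 4 →
      ((L.foldl (pvHStep h_ r) q).getD x pvW0)[0]? =
        if x.1 = r + 1 ∧ x.2 ∈ L then some (pvHVGet h_ r x.2) else ((q.getD x pvW0))[0]? := by
  induction L with
  | nil => intro q x _; simp
  | cons c L ih =>
    rintro q ⟨x1, x2⟩ hlen
    simp only [List.foldl_cons]
    rw [ih _ _ (by rw [len_getD_pvHStep]; exact hlen), getD_pvHStep]
    simp only [Prod.mk.injEq, List.mem_cons]
    by_cases hP : x1 = r + 1 ∧ (x2 : Int) ∈ L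
    · rw [if_pos hP, if_pos (show x1 = r + 1 ∧ (x2 = c ∨ (x2 : Int) ∈ L) from ⟨hP.1, Or.inr hP.2⟩)]
    · rw [if_neg hP]
      by_cases hH : x1 = r + 1 ∧ x2 = c
      · obtain ⟨hr1, hc1⟩ := hH
        subst hc1
        rw [if_pos (show x1 = r + 1 ∧ x2 = x2 from ⟨hr1, rfl⟩)]
        rw [if_pos (show x1 = r + 1 ∧ (x2 = x2 ∨ (x2 : Int) ∈ L) from ⟨hr1, Or.inl rfl⟩)]
        rw [show (0 : Int) = ((0 : Nat) : Int) from rfl, pvSetD_set,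
          List.getElem?_set_self (by omega)]
      · rw [if_neg (show ¬(x1 = r + 1 ∧ (x2 = c ∨ (x2 : Int) ∈ L)) from by
          rintro ⟨hr1, hor⟩
          rcases hor with hu | hm
          · exact hH ⟨hr1, hu⟩
          · exact hP ⟨hr1, hm⟩)]
        split_ifs with e1
        · rw [show (2 : Int) = ((2 : Nat) : Int) from rfl, pvSetD_set,
            List.getElem?_set_ne (by omega)]
        · rfl

-- components 1 and 3 are untouched by the horizontal fold
theorem hfold_comp13 (h_ : List (List Int)) (r : Int) (L : List Int) (k : Nat)
    (hk0 : k ≠ 0) (hk2 : k ≠ 2) :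
    ∀ (q : PySem.Dict (Int × Int) (List Int)) (x : Int × Int),
      ((L.foldl (pvHStep h_ r) q).getD x pvW0)[k]? = ((q.getD x pvW0))[k]? := by
  induction L with
  | nil => intro q x; rfl
  | cons c L ih =>
    intro q x
    simp only [List.foldl_cons]
    rw [ih, getD_pvHStep]
    split_ifs
    · rw [show (0 : Int) = ((0 : Nat) : Int) from rfl, pvSetD_set, List.getElem?_set_ne (by omega)]
    · rw [show (2 : Int) = ((2 : Nat) : Int) from rfl, pvSetD_set, List.getElem?_set_ne (by omega)]
    · rfl

-- the zip(run, run[1:]) pairs of the sorted run of a row set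
def pvPairs (cs : PySem.Set Int) : List (Int × Int) :=
  (PySem.List.sorted cs (fun x => x) false).zip (PySem.List.sorted cs (fun x => x) false).tail

-- one row step, componentwise
theorem rowstep_comp1 (h_ v : List (List Int)) (cbr : PySem.Dict Int (PySem.Set Int))
    (q : PySem.Dict (Int × Int) (List Int)) (e : Int × PySem.Set Int) (x : Int × Int)
    (hlen : (q.getD x pvW0).length = 4) :
    ((pvRowStep h_ v cbr q e).getD x pvW0)[1]? =
      if x.1 = e.1 ∧ (x.2, x.2 + 1) ∈ pvPairs e.2 then some (pvHVGet v e.1 x.2)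
      else ((q.getD x pvW0))[1]? := by
  simp only [pvRowStep]
  rw [hfold_comp13 _ _ _ 1 (by omega) (by omega), vfold_comp1 _ _ _ _ _ hlen]
  rfl

theorem rowstep_comp3 (h_ v : List (List Int)) (cbr : PySem.Dict Int (PySem.Set Int))
    (q : PySem.Dict (Int × Int) (List Int)) (e : Int × PySem.Set Int) (x : Int × Int)
    (hlen : (q.getD x pvW0).length = 4) :
    ((pvRowStep h_ v cbr q e).getD x pvW0)[3]? =
      if x.1 = e.1 ∧ (x.2 - 1, x.2) ∈ pvPairs e.2 then some (pvHVGet v e.1 (x.2 - 1))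
      else ((q.getD x pvW0))[3]? := by
  simp only [pvRowStep]
  rw [hfold_comp13 _ _ _ 3 (by omega) (by omega), vfold_comp3 _ _ _ _ _ hlen]
  rfl

theorem rowstep_comp2 (h_ v : List (List Int)) (cbr : PySem.Dict Int (PySem.Set Int))
    (q : PySem.Dict (Int × Int) (List Int)) (e : Int × PySem.Set Int) (x : Int × Int)
    (hlen : (q.getD x pvW0).length = 4) :
    ((pvRowStep h_ v cbr q e).getD x pvW0)[2]? =
      if x.1 = e.1 ∧ x.2 ∈ PySem.Set.inter e.2 (cbr.getD (e.1 + 1) PySem.Set.empty) then some (pvHVGet h_ e.1 x.2)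
      else ((q.getD x pvW0))[2]? := by
  simp only [pvRowStep]
  rw [hfold_comp2 _ _ _ _ _ (by rw [len_getD_vfold]; exact hlen), vfold_comp02 _ _ _ 2 (by omega) (by omega)]

theorem rowstep_comp0 (h_ v : List (List Int)) (cbr : PySem.Dict Int (PySem.Set Int))
    (q : PySem.Dict (Int × Int) (List Int)) (e : Int × PySem.Set Int) (x : Int × Int)
    (hlen : (q.getD x pvW0).length = 4) :
    ((pvRowStep h_ v cbr q e).getD x pvW0)[0]? =
      if x.1 = e.1 + 1 ∧ x.2 ∈ PySem.Set.inter e.2 (cbr.getD (e.1 + 1) PySem.Set.empty) then some (pvHVGet h_ e.1 x.2)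
      else ((q.getD x pvW0))[0]? := by
  simp only [pvRowStep]
  rw [hfold_comp0 _ _ _ _ _ (by rw [len_getD_vfold]; exact hlen), vfold_comp02 _ _ _ 0 (by omega) (by omega)]

-- the outer fold over the row entries, componentwise
theorem outer_comp1 (h_ v : List (List Int)) (cbr : PySem.Dict Int (PySem.Set Int))
    (E : List (Int × PySem.Set Int)) :
    ∀ (q : PySem.Dict (Int × Int) (List Int)) (x : Int × Int), (q.getD x pvW0).length = 4 →
      ((E.foldl (pvRowStep h_ v cbr) q).getD x pvW0)[1]? =
        if ∃ e ∈ E, x.1 = e.1 ∧ (x.2, x.2 + 1) ∈ pvPairs e.2 then some (pvHVGet v x.1 x.2)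
        else ((q.getD x pvW0))[1]? := by
  induction E with
  | nil => intro q x _; simp
  | cons e E ih =>
    intro q x hlen
    simp only [List.foldl_cons]
    rw [ih _ _ (by rw [len_getD_pvRowStep]; exact hlen)]
    rw [rowstep_comp1 _ _ _ _ _ _ hlen]
    by_cases hmem : ∃ e' ∈ E, x.1 = e'.1 ∧ (x.2, x.2 + 1) ∈ pvPairs e'.2
    · rw [if_pos hmem, if_pos (by obtain ⟨e', h1, h2⟩ := hmem; exact ⟨e', List.mem_cons_of_mem _ h1, h2⟩)]
    · rw [if_neg hmem]
      by_cases hhead : x.1 = e.1 ∧ (x.2, x.2 + 1) ∈ pvPairs e.2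
      · rw [if_pos hhead, if_pos ⟨e, List.mem_cons_self, hhead⟩, hhead.1]
      · rw [if_neg hhead, if_neg (by
          rintro ⟨e', hm, hc⟩
          rcases List.mem_cons.mp hm with he | hm
          · exact hhead (he ▸ hc)
          · exact hmem ⟨e', hm, hc⟩)]

theorem outer_comp3 (h_ v : List (List Int)) (cbr : PySem.Dict Int (PySem.Set Int))
    (E : List (Int × PySem.Set Int)) :
    ∀ (q : PySem.Dict (Int × Int) (List Int)) (x : Int × Int), (q.getD x pvW0).length = 4 →
      ((E.foldl (pvRowStep h_ v cbr) q).getD x pvW0)[3]? =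
        if ∃ e ∈ E, x.1 = e.1 ∧ (x.2 - 1, x.2) ∈ pvPairs e.2 then some (pvHVGet v x.1 (x.2 - 1))
        else ((q.getD x pvW0))[3]? := by
  induction E with
  | nil => intro q x _; simp
  | cons e E ih =>
    intro q x hlen
    simp only [List.foldl_cons]
    rw [ih _ _ (by rw [len_getD_pvRowStep]; exact hlen)]
    rw [rowstep_comp3 _ _ _ _ _ _ hlen]
    by_cases hmem : ∃ e' ∈ E, x.1 = e'.1 ∧ (x.2 - 1, x.2) ∈ pvPairs e'.2
    · rw [if_pos hmem, if_pos (by obtain ⟨e', h1, h2⟩ := hmem; exact ⟨e', List.mem_cons_of_mem _ h1, h2⟩)]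
    · rw [if_neg hmem]
      by_cases hhead : x.1 = e.1 ∧ (x.2 - 1, x.2) ∈ pvPairs e.2
      · rw [if_pos hhead, if_pos ⟨e, List.mem_cons_self, hhead⟩, hhead.1]
      · rw [if_neg hhead, if_neg (by
          rintro ⟨e', hm, hc⟩
          rcases List.mem_cons.mp hm with he | hm
          · exact hhead (he ▸ hc)
          · exact hmem ⟨e', hm, hc⟩)]

theorem outer_comp2 (h_ v : List (List Int)) (cbr : PySem.Dict Int (PySem.Set Int))
    (E : List (Int × PySem.Set Int)) :
    ∀ (q : PySem.Dict (Int × Int) (List Int)) (x : Int × Int), (q.getD x pvW0).length = 4 →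
      ((E.foldl (pvRowStep h_ v cbr) q).getD x pvW0)[2]? =
        if ∃ e ∈ E, x.1 = e.1 ∧ x.2 ∈ PySem.Set.inter e.2 (cbr.getD (e.1 + 1) PySem.Set.empty) then some (pvHVGet h_ x.1 x.2)
        else ((q.getD x pvW0))[2]? := by
  induction E with
  | nil => intro q x _; simp
  | cons e E ih =>
    intro q x hlen
    simp only [List.foldl_cons]
    rw [ih _ _ (by rw [len_getD_pvRowStep]; exact hlen)]
    rw [rowstep_comp2 _ _ _ _ _ _ hlen]
    by_cases hmem : ∃ e' ∈ E, x.1 = e'.1 ∧ x.2 ∈ PySem.Set.inter e'.2 (cbr.getD (e'.1 + 1) PySem.Set.empty)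
    · rw [if_pos hmem, if_pos (by obtain ⟨e', h1, h2⟩ := hmem; exact ⟨e', List.mem_cons_of_mem _ h1, h2⟩)]
    · rw [if_neg hmem]
      by_cases hhead : x.1 = e.1 ∧ x.2 ∈ PySem.Set.inter e.2 (cbr.getD (e.1 + 1) PySem.Set.empty)
      · rw [if_pos hhead, if_pos ⟨e, List.mem_cons_self, hhead⟩, hhead.1]
      · rw [if_neg hhead, if_neg (by
          rintro ⟨e', hm, hc⟩
          rcases List.mem_cons.mp hm with he | hm
          · exact hhead (he ▸ hc)
          · exact hmem ⟨e', hm, hc⟩)]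

theorem outer_comp0 (h_ v : List (List Int)) (cbr : PySem.Dict Int (PySem.Set Int))
    (E : List (Int × PySem.Set Int)) :
    ∀ (q : PySem.Dict (Int × Int) (List Int)) (x : Int × Int), (q.getD x pvW0).length = 4 →
      ((E.foldl (pvRowStep h_ v cbr) q).getD x pvW0)[0]? =
        if ∃ e ∈ E, x.1 = e.1 + 1 ∧ x.2 ∈ PySem.Set.inter e.2 (cbr.getD (e.1 + 1) PySem.Set.empty) then some (pvHVGet h_ (x.1 - 1) x.2)
        else ((q.getD x pvW0))[0]? := by
  induction E with
  | nil => intro q x _; simp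
  | cons e E ih =>
    intro q x hlen
    simp only [List.foldl_cons]
    rw [ih _ _ (by rw [len_getD_pvRowStep]; exact hlen)]
    rw [rowstep_comp0 _ _ _ _ _ _ hlen]
    by_cases hmem : ∃ e' ∈ E, x.1 = e'.1 + 1 ∧ x.2 ∈ PySem.Set.inter e'.2 (cbr.getD (e'.1 + 1) PySem.Set.empty)
    · rw [if_pos hmem, if_pos (by obtain ⟨e', h1, h2⟩ := hmem; exact ⟨e', List.mem_cons_of_mem _ h1, h2⟩)]
    · rw [if_neg hmem]
      by_cases hhead : x.1 = e.1 + 1 ∧ x.2 ∈ PySem.Set.inter e.2 (cbr.getD (e.1 + 1) PySem.Set.empty)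
      · rw [if_pos hhead, if_pos ⟨e, List.mem_cons_self, hhead⟩]
        have : e.1 = x.1 - 1 := by omega
        rw [this]
      · rw [if_neg hhead, if_neg (by
          rintro ⟨e', hm, hc⟩
          rcases List.mem_cons.mp hm with he | hm
          · exact hhead (he ▸ hc)
          · exact hmem ⟨e', hm, hc⟩)]

theorem map_fst_pair {α β : Type} (L : List α) (b : β) :
    (L.map (fun p => (p, b))).map (·.1) = L := by
  induction L with
  | nil => rfl
  | cons x L ih => simp [ih]

-- the initial all-boundary dict
theorem pvW0_items (occ : PySem.Set (Int × Int)) (hnd : occ.Nodup) :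
    (occ.foldl (fun d p => d.insert p pvW0) PySem.Dict.empty).items
      = occ.map (fun p => (p, pvW0)) := by
  have := PySem.Dict.items_foldl_insert_fresh occ (fun p => p) (fun _ => pvW0) PySem.Dict.empty
    (fun a _ => PySem.Dict.contains_empty a) (by simpa using hnd)
  simpa using this

theorem pvW0_keys (occ : PySem.Set (Int × Int)) (hnd : occ.Nodup) :
    (occ.foldl (fun d p => d.insert p pvW0) PySem.Dict.empty).keys = occ := by
  show ((occ.foldl (fun d p => d.insert p pvW0) PySem.Dict.empty).items.map (·.1)) = occ
  rw [pvW0_items occ hnd, map_fst_pair]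

theorem pvW0_getD (occ : PySem.Set (Int × Int)) (hnd : occ.Nodup) (q : Int × Int) :
    (occ.foldl (fun d p => d.insert p pvW0) PySem.Dict.empty).getD q pvW0 = pvW0 := by
  by_cases hq : q ∈ occ
  · have hmem : (q, pvW0) ∈ (occ.foldl (fun d p => d.insert p pvW0) PySem.Dict.empty).items := by
      rw [pvW0_items occ hnd]
      exact List.mem_map.mpr ⟨q, hq, rfl⟩
    have hnk : (occ.foldl (fun d p => d.insert p pvW0) PySem.Dict.empty).keys.Nodup := by
      rw [pvW0_keys occ hnd]; exact hnd
    exact PySem.Dict.getD_of_mem_items _ hmem hnk pvW0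
  · have hc : (occ.foldl (fun d p => d.insert p pvW0) PySem.Dict.empty).contains q = false := by
      rw [PySem.Dict.contains_eq_decide_mem_keys, pvW0_keys occ hnd]
      simpa using hq
    exact PySem.Dict.getD_of_not_contains _ pvW0 hc

-- adjacency via the sorted run: (c, c+1) is a pair of pvPairs iff both columns are in the set
theorem mem_pvPairs (cs : PySem.Set Int) (hnd : cs.Nodup) (c : Int) :
    (c, c + 1) ∈ pvPairs cs ↔ c ∈ cs ∧ c + 1 ∈ cs := by
  unfold pvPairs
  rw [pvAdjPair _ (run_pairwise_lt cs hnd) c]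
  rw [PySem.List.mem_sorted, PySem.List.mem_sorted]

-- the value of every occupied cell after B's passes is A's quadruple (cells on the board)
theorem pvFold_getD_alt (rows cols : Int) (h_ v : List (List Int)) (occ : PySem.Set (Int × Int))
    (hnd : occ.Nodup)
    (hedge : ∀ p ∈ occ, ((p.1, p.2 + 1) ∈ occ → 0 ≤ p.2 ∧ p.2 < cols - 1) ∧
      ((p.1 + 1, p.2) ∈ occ → 0 ≤ p.1 ∧ p.1 < rows - 1))
    (q : Int × Int) (hq : q ∈ occ) :
    ((pvCbr occ).items.foldl (pvRowStep h_ v (pvCbr occ))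
        (occ.foldl (fun d p => d.insert p pvW0) PySem.Dict.empty)).getD q pvW0
      = pvQuad rows cols h_ v occ q := by
  set d0 := occ.foldl (fun d p => d.insert p pvW0) PySem.Dict.empty with hd0
  have hg : d0.getD q pvW0 = pvW0 := pvW0_getD occ hnd q
  have hlen : (d0.getD q pvW0).length = 4 := by rw [hg]; rfl
  set cbr := pvCbr occ with hcbr
  have hitems : cbr.items = cbr.keys.map (fun k => (k, cbr.getD k PySem.Set.empty)) :=
    PySem.Dict.items_eq_map_keys cbr (nodup_keys_pvCbr occ) PySem.Set.empty
  -- the ∃-conditions over cbr.items in terms of occ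
  have hexist : ∀ (C : Int → PySem.Set Int → Prop),
      ((∃ e ∈ cbr.items, C e.1 e.2) ↔ (∃ k ∈ cbr.keys, C k (cbr.getD k PySem.Set.empty))) := by
    intro C
    rw [hitems]
    constructor
    · rintro ⟨e, hm, hc⟩
      obtain ⟨k, hk, rfl⟩ := List.mem_map.mp hm
      exact ⟨k, hk, hc⟩
    · rintro ⟨k, hk, hc⟩
      exact ⟨(k, cbr.getD k PySem.Set.empty), List.mem_map.mpr ⟨k, hk, rfl⟩, hc⟩
  have hkeymem : ∀ r : Int, r ∈ cbr.keys ↔ ∃ p ∈ occ, p.1 = r := by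
    intro r
    simp [hcbr, keys_pvCbr, PySem.Set.mem_ofList]
  obtain ⟨r, c⟩ := q
  -- R is the final value; compute its four components
  set R := (cbr.items.foldl (pvRowStep h_ v cbr) d0).getD (r, c) pvW0 with hR
  have hlenR : R.length = 4 := by rw [hR, len_getD_outer, hlen]
  have h1 := outer_comp1 h_ v cbr cbr.items d0 (r, c) hlen
  have h3 := outer_comp3 h_ v cbr cbr.items d0 (r, c) hlen
  have h2 := outer_comp2 h_ v cbr cbr.items d0 (r, c) hlen
  have h0 := outer_comp0 h_ v cbr cbr.items d0 (r, c) hlen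
  rw [← hR, hg] at h0 h1 h2 h3
  -- translate each condition to occupancy
  have hrow : ∀ r' c' : Int, c' ∈ cbr.getD r' PySem.Set.empty ↔ (r', c') ∈ occ := by
    intro r' c'; rw [hcbr]; exact mem_getD_pvCbr occ r' c'
  have hrownd : ∀ r' : Int, ((cbr.getD r' PySem.Set.empty : PySem.Set Int)).Nodup := by
    intro r'; rw [hcbr]; exact nodup_getD_pvCbr occ r'
  have hcond1 : (∃ e ∈ cbr.items, (r, c).1 = e.1 ∧ ((r, c).2, (r, c).2 + 1) ∈ pvPairs e.2)
      ↔ (r, c + 1) ∈ occ := by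
    rw [hexist (fun a b => (r, c).1 = a ∧ ((r, c).2, (r, c).2 + 1) ∈ pvPairs b)]
    constructor
    · rintro ⟨k, hk, he, hp⟩
      have : c + 1 ∈ cbr.getD k PySem.Set.empty :=
        ((mem_pvPairs _ (hrownd k) c).mp hp).2
      rw [hrow] at this
      simpa [← he] using this
    · intro hocc
      refine ⟨r, (hkeymem r).mpr ⟨(r, c), hq, rfl⟩, rfl, ?_⟩
      rw [mem_pvPairs _ (hrownd r) c, hrow, hrow]
      exact ⟨hq, hocc⟩
  have hcond3 : (∃ e ∈ cbr.items, (r, c).1 = e.1 ∧ ((r, c).2 - 1, (r, c).2) ∈ pvPairs e.2)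
      ↔ (r, c - 1) ∈ occ := by
    rw [hexist (fun a b => (r, c).1 = a ∧ ((r, c).2 - 1, (r, c).2) ∈ pvPairs b)]
    constructor
    · rintro ⟨k, hk, he, hp⟩
      have hp' : (c - 1, c - 1 + 1) ∈ pvPairs (cbr.getD k PySem.Set.empty) := by
        simpa [show c - 1 + 1 = c by omega] using hp
      have : c - 1 ∈ cbr.getD k PySem.Set.empty :=
        ((mem_pvPairs _ (hrownd k) (c - 1)).mp hp').1
      rw [hrow] at this
      simpa [← he] using this
    · intro hocc
      refine ⟨r, (hkeymem r).mpr ⟨(r, c), hq, rfl⟩, rfl, ?_⟩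
      have : (c - 1, c - 1 + 1) ∈ pvPairs (cbr.getD r PySem.Set.empty) := by
        rw [mem_pvPairs _ (hrownd r) (c - 1), hrow, hrow]
        exact ⟨hocc, by simpa [show c - 1 + 1 = c by omega] using hq⟩
      simpa [show c - 1 + 1 = c by omega] using this
  have hcond2 : (∃ e ∈ cbr.items, (r, c).1 = e.1 ∧ (r, c).2 ∈ PySem.Set.inter e.2 (cbr.getD (e.1 + 1) PySem.Set.empty))
      ↔ (r + 1, c) ∈ occ := by
    rw [hexist (fun a b => (r, c).1 = a ∧ (r, c).2 ∈ PySem.Set.inter b (cbr.getD (a + 1) PySem.Set.empty))]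
    constructor
    · rintro ⟨k, hk, he, hp⟩
      rw [PySem.Set.mem_inter] at hp
      have := hp.2
      rw [hrow] at this
      simpa [← he] using this
    · intro hocc
      refine ⟨r, (hkeymem r).mpr ⟨(r, c), hq, rfl⟩, rfl, ?_⟩
      rw [PySem.Set.mem_inter, hrow, hrow]
      exact ⟨hq, hocc⟩
  have hcond0 : (∃ e ∈ cbr.items, (r, c).1 = e.1 + 1 ∧ (r, c).2 ∈ PySem.Set.inter e.2 (cbr.getD (e.1 + 1) PySem.Set.empty))
      ↔ (r - 1, c) ∈ occ := by
    rw [hexist (fun a b => (r, c).1 = a + 1 ∧ (r, c).2 ∈ PySem.Set.inter b (cbr.getD (a + 1) PySem.Set.empty))]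
    constructor
    · rintro ⟨k, hk, he, hp⟩
      rw [PySem.Set.mem_inter] at hp
      have := hp.1
      rw [hrow] at this
      have hk' : k = r - 1 := by simp at he; omega
      simpa [hk'] using this
    · intro hocc
      refine ⟨r - 1, (hkeymem (r - 1)).mpr ⟨(r - 1, c), hocc, rfl⟩, (by omega : r = r - 1 + 1), ?_⟩
      rw [PySem.Set.mem_inter, hrow, hrow]
      exact ⟨hocc, by simpa [show r - 1 + 1 = r by omega] using hq⟩
  obtain ⟨a, b, c', e, hRe⟩ : ∃ a b c' e, R = [a, b, c', e] := by
    match R, hlenR with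
    | [a, b, c', e], _ => exact ⟨a, b, c', e, rfl⟩
  rw [hRe] at h0 h1 h2 h3 ⊢
  simp only [List.getElem?_cons_zero, List.getElem?_cons_succ, Option.some.injEq, pvW0] at h0 h1 h2 h3
  unfold pvQuad
  simp only []
  have htop : (if !(PySem.Set.contains occ (r - 1, c)) then (1 : Int) else if r > 0 then pvHVGet h_ (r - 1) c else 1) = a := by
    by_cases m : (r - 1, c) ∈ occ
    · have hb' := (PySem.Set.contains_iff occ _).mpr m
      have hbd := (hedge _ m).2 (by
        show ((r - 1 : Int) + 1, c) ∈ occ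
        simpa [show (r - 1 : Int) + 1 = r by omega] using hq)
      rw [if_pos (hcond0.mpr m)] at h0
      simp only [Option.some.injEq] at h0
      rw [hb']
      simp only [Bool.not_true, Bool.false_eq_true, if_false]
      rw [if_pos (by simp at hbd ⊢; omega)]
      exact h0.symm
    · have hb' : PySem.Set.contains occ (r - 1, c) = false :=
        Bool.eq_false_iff.mpr (fun hh => m ((PySem.Set.contains_iff occ _).mp hh))
      rw [if_neg (fun hx => m (hcond0.mp hx))] at h0
      simp only [Option.some.injEq] at h0
      rw [hb', h0]
      simp
  have hright : (if !(PySem.Set.contains occ (r, c + 1)) then (1 : Int) else if c < cols - 1 then pvHVGet v r c else 1) = b := by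
    by_cases m : (r, c + 1) ∈ occ
    · have hb' := (PySem.Set.contains_iff occ _).mpr m
      have hbd := (hedge _ hq).1 m
      rw [if_pos (hcond1.mpr m)] at h1
      simp only [Option.some.injEq] at h1
      rw [hb']
      simp only [Bool.not_true, Bool.false_eq_true, if_false]
      rw [if_pos (by simp at hbd ⊢; omega)]
      exact h1.symm
    · have hb' : PySem.Set.contains occ (r, c + 1) = false :=
        Bool.eq_false_iff.mpr (fun hh => m ((PySem.Set.contains_iff occ _).mp hh))
      rw [if_neg (fun hx => m (hcond1.mp hx))] at h1
      simp only [Option.some.injEq] at h1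
      rw [hb', h1]
      simp
  have hbot : (if !(PySem.Set.contains occ (r + 1, c)) then (1 : Int) else if r < rows - 1 then pvHVGet h_ r c else 1) = c' := by
    by_cases m : (r + 1, c) ∈ occ
    · have hb' := (PySem.Set.contains_iff occ _).mpr m
      have hbd := (hedge _ hq).2 m
      rw [if_pos (hcond2.mpr m)] at h2
      simp only [Option.some.injEq] at h2
      rw [hb']
      simp only [Bool.not_true, Bool.false_eq_true, if_false]
      rw [if_pos (by simp at hbd ⊢; omega)]
      exact h2.symm
    · have hb' : PySem.Set.contains occ (r + 1, c) = false :=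
        Bool.eq_false_iff.mpr (fun hh => m ((PySem.Set.contains_iff occ _).mp hh))
      rw [if_neg (fun hx => m (hcond2.mp hx))] at h2
      simp only [Option.some.injEq] at h2
      rw [hb', h2]
      simp
  have hleft : (if !(PySem.Set.contains occ (r, c - 1)) then (1 : Int) else if c > 0 then pvHVGet v r (c - 1) else 1) = e := by
    by_cases m : (r, c - 1) ∈ occ
    · have hb' := (PySem.Set.contains_iff occ _).mpr m
      have hbd := (hedge _ m).1 (by
        show (r, (c - 1 : Int) + 1) ∈ occ
        simpa [show (c - 1 : Int) + 1 = c by omega] using hq)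
      rw [if_pos (hcond3.mpr m)] at h3
      simp only [Option.some.injEq] at h3
      rw [hb']
      simp only [Bool.not_true, Bool.false_eq_true, if_false]
      rw [if_pos (by simp at hbd ⊢; omega)]
      exact h3.symm
    · have hb' : PySem.Set.contains occ (r, c - 1) = false :=
        Bool.eq_false_iff.mpr (fun hh => m ((PySem.Set.contains_iff occ _).mp hh))
      rw [if_neg (fun hx => m (hcond3.mp hx))] at h3
      simp only [Option.some.injEq] at h3
      rw [hb', h3]
      simp
  rw [htop, hright, hbot, hleft]

-- ===== VERDICT (by name: the statement is the Claim_ definition above) =====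
theorem derive_walls_sparse_spec : Claim_equal_derive_walls_sparse := by
  intro rows cols paths h_ v _ hpre
  unfold Spec_derive_walls_sparse
  show derive_walls_sparse rows cols paths h_ v = derive_walls_sparse_alt rows cols paths h_ v
  simp only [derive_walls_sparse, derive_walls_sparse_alt]
  have hnd : (pvOcc paths).Nodup := by rw [pvOcc_eq]; exact PySem.Set.nodup_ofList _
  have hedge : ∀ p ∈ pvOcc paths, ((p.1, p.2 + 1) ∈ pvOcc paths → 0 ≤ p.2 ∧ p.2 < cols - 1) ∧
      ((p.1 + 1, p.2) ∈ pvOcc paths → 0 ≤ p.1 ∧ p.1 < rows - 1) := by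
    intro p hp
    rw [pvOcc_eq, PySem.Set.mem_ofList] at hp
    refine ⟨fun hn => ?_, fun hn => ?_⟩
    · rw [pvOcc_eq, PySem.Set.mem_ofList] at hn
      exact ⟨((hpre.2 p hp).1 hn).1, ((hpre.2 p hp).1 hn).2.1⟩
    · rw [pvOcc_eq, PySem.Set.mem_ofList] at hn
      exact ⟨((hpre.2 p hp).2 hn).1, ((hpre.2 p hp).2 hn).2.1⟩
  refine congrArg PySem.Dict.items ?_
  refine (PySem.List.foldl_congr_mem (pvOcc paths) _ _ PySem.Dict.empty ?_).symm
  intro acc p hp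
  rw [pvFold_getD_alt rows cols h_ v (pvOcc paths) hnd hedge p hp]
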